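-- pv_equiv track=rewrite | github.com/parth01032000/FSDS_Assignments.github | program24.py | amplify_numbers
-- ===== SOURCE A (Python) =====
-- def amplify_numbers(num):
--     result = []
--     for i in range(1, num + 1):
--         if i % 4 == 0:
--             result.append(i * 10)
--         else:
--             result.append(i)
--     return result
-- ===== SOURCE B (Python) =====
-- def amplify_numbers(num):
--     result = list(range(1, num + 1))
--     for j in range(3, num, 4):
--         result[j] *= 10
--     return result
-- ===== Notes on version B (the rewrite author's own statement) =====
-- stated objective: alternative
-- what changed: B builds the whole list in one shot with list(range(...)) and then rewrites only every fourth position in a strided second pass, removing A's per-element modulo test and branch inside the building loop.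
import Mathlib
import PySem

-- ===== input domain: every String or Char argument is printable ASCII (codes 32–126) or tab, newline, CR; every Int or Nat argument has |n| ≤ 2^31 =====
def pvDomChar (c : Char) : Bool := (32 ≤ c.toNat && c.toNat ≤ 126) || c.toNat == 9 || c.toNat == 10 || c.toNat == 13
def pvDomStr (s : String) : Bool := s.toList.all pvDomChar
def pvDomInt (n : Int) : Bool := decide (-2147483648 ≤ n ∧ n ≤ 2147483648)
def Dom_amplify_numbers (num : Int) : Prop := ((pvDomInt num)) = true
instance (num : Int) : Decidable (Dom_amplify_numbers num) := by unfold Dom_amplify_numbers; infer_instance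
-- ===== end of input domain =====

-- B builds the full list 1..num first and then multiplies only the strided positions 3,7,11,... by 10,
-- instead of A's per-element modulo branch while appending (alternative decomposition, same cost).

-- ===== PORT A =====
def amplify_numbers (num : Int) : List Int :=
  (PySem.List.pyRange 1 (num + 1) 1).foldl
    (fun result i => if PySem.Int.mod i 4 == 0 then result ++ [i * 10] else result ++ [i]) []

-- ===== PORT B =====
def amplify_numbers_alt (num : Int) : List Int :=
  let result := PySem.List.pyRange 1 (num + 1) 1
  (PySem.List.pyRange 3 num 4).foldl
    (fun result j => PySem.List.pySetD result j (PySem.List.pyGetD result j 0 * 10)) result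

-- ===== PRECONDITION & SPEC =====
def Spec_amplify_numbers (num : Int) (out : List Int) : Prop := out = amplify_numbers_alt num
instance (num : Int) (out : List Int) : Decidable (Spec_amplify_numbers num out) := by unfold Spec_amplify_numbers; infer_instance

-- ===== CLAIM (what is proved, stated in full; the proofs are below) =====
def Claim_equal_amplify_numbers : Prop := ∀ (num : Int), Dom_amplify_numbers num → Spec_amplify_numbers num (amplify_numbers num)

-- ===== LEMMAS AND PROOFS =====

-- B's strided loop preserves the length of the list.
theorem foldl_mulset_length (js : List Int) (l : List Int) :
    (js.foldl (fun r j => PySem.List.pySetD r j (PySem.List.pyGetD r j 0 * 10)) l).length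
      = l.length := by
  induction js generalizing l with
  | nil => rfl
  | cons j js ih => simp [List.foldl_cons, ih, PySem.List.length_pySetD]

-- Pointwise characterisation of B's strided loop: an in-range entry is multiplied by 10
-- exactly when its index occurs in the (nodup, in-range) index list.
theorem foldl_mulset_getD (js : List Int) (l : List Int) (k : Int)
    (hk0 : 0 ≤ k)
    (hb : ∀ j ∈ js, 0 ≤ j ∧ j < (l.length : Int)) (hnd : js.Nodup) :
    PySem.List.pyGetD (js.foldl (fun r j => PySem.List.pySetD r j (PySem.List.pyGetD r j 0 * 10)) l) k 0
      = if k ∈ js then PySem.List.pyGetD l k 0 * 10 else PySem.List.pyGetD l k 0 := by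
  induction js generalizing l with
  | nil => simp
  | cons j js ih =>
    obtain ⟨hj0, hjl⟩ := hb j (by simp)
    have hjn : j = ((j.toNat : Nat) : Int) := by omega
    have hkn : k = ((k.toNat : Nat) : Int) := by omega
    have hjlen : j.toNat < l.length := by omega
    have hset : PySem.List.pyGetD
        (PySem.List.pySetD l j (PySem.List.pyGetD l j 0 * 10)) k 0
        = if k = j then PySem.List.pyGetD l j 0 * 10 else PySem.List.pyGetD l k 0 := by
      rw [hjn, hkn, PySem.List.pyGetD_pySetD_natCast l j.toNat k.toNat _ _ hjlen,
        ← hkn, ← hjn]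
      by_cases h : k = j
      · simp [h]
      · rw [if_neg (by omega), if_neg h]
    have hb' : ∀ x ∈ js, 0 ≤ x ∧ x < ((PySem.List.pySetD l j (PySem.List.pyGetD l j 0 * 10)).length : Int) := by
      intro x hx
      have := hb x (by simp [hx])
      simpa [PySem.List.length_pySetD] using this
    have hjnot : j ∉ js := (List.nodup_cons.mp hnd).1
    rw [List.foldl_cons, ih _ hb' hnd.of_cons, hset]
    by_cases hmem : k ∈ js
    · have hkj : ¬ k = j := fun h => hjnot (h ▸ hmem)
      simp [hmem, hkj]
    · by_cases hkj : k = j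
      · subst hkj; simp [hmem]
      · simp [hmem, hkj]

-- A is the map of the branch function over range(1, num+1).
theorem amplify_numbers_eq_map (num : Int) :
    amplify_numbers num
      = (PySem.List.pyRange 1 (num + 1) 1).map
          (fun i => if PySem.Int.mod i 4 == 0 then i * 10 else i) := by
  unfold amplify_numbers
  have : (fun (result : List Int) (i : Int) =>
      if PySem.Int.mod i 4 == 0 then result ++ [i * 10] else result ++ [i])
      = fun result i => result ++ [if PySem.Int.mod i 4 == 0 then i * 10 else i] := by
    funext r i
    by_cases h : (PySem.Int.mod i 4 == 0) = true
    · rw [if_pos h, if_pos h]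
    · rw [if_neg h, if_neg h]
  rw [this, PySem.List.foldl_append_singleton_eq_map]
  simp

-- The stride range(3, num, 4) has no duplicate indices.
theorem nodup_stride (num : Int) : (PySem.List.pyRange 3 num 4).Nodup := by
  rw [PySem.List.pyRange_of_pos 3 num (by norm_num)]
  exact (List.nodup_range).map (fun a b h => by omega)

theorem amplify_numbers_spec : Claim_equal_amplify_numbers := by
  intro num _
  unfold Spec_amplify_numbers
  rw [amplify_numbers_eq_map]
  unfold amplify_numbers_alt
  have hlenR : (PySem.List.pyRange 1 (num + 1) 1).length = (num : Int).toNat := by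
    rw [PySem.List.length_pyRange_one]; congr 1; omega
  have hb : ∀ j ∈ PySem.List.pyRange 3 num 4,
      0 ≤ j ∧ j < ((PySem.List.pyRange 1 (num + 1) 1).length : Int) := by
    intro j hj
    rw [PySem.List.mem_pyRange_iff_of_pos (by norm_num)] at hj
    obtain ⟨h1, h2, _⟩ := hj
    constructor
    · omega
    · rw [hlenR]; omega
  apply List.ext_getElem
  · simp [foldl_mulset_length, hlenR]
  · intro k h1 h2
    have hklen : k < (PySem.List.pyRange 1 (num + 1) 1).length := by
      simpa [foldl_mulset_length] using h2
    have hRk : (PySem.List.pyRange 1 (num + 1) 1)[k]'hklen = 1 + (k : Int) :=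
      PySem.List.getElem_pyRange_one 1 (num + 1) k hklen
    have hGk : PySem.List.pyGetD (PySem.List.pyRange 1 (num + 1) 1) ((k : Nat) : Int) 0
        = 1 + (k : Int) := by
      rw [PySem.List.pyGetD_natCast, List.getD_eq_getElem _ _ hklen, hRk]
    have hB := foldl_mulset_getD (PySem.List.pyRange 3 num 4)
      (PySem.List.pyRange 1 (num + 1) 1) ((k : Nat) : Int) (by omega) hb (nodup_stride num)
    have hBk : ((PySem.List.pyRange 3 num 4).foldl
        (fun r j => PySem.List.pySetD r j (PySem.List.pyGetD r j 0 * 10))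
        (PySem.List.pyRange 1 (num + 1) 1))[k]'h2
        = if ((k : Nat) : Int) ∈ PySem.List.pyRange 3 num 4
            then (1 + (k : Int)) * 10 else 1 + (k : Int) := by
      rw [← List.getD_eq_getElem _ 0 h2, ← PySem.List.pyGetD_natCast, hB, hGk]
    rw [List.getElem_map, hRk, hBk]
    have hknum : (k : Int) < num := by
      rw [hlenR] at hklen; omega
    have hmemiff : ((k : Nat) : Int) ∈ PySem.List.pyRange 3 num 4
        ↔ (1 + (k : Int)) % 4 = 0 := by
      rw [PySem.List.mem_pyRange_iff_of_pos (by norm_num)]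
      omega
    rw [PySem.Int.mod_eq_emod_of_pos (by norm_num)]
    by_cases hmod : (1 + (k : Int)) % 4 = 0
    · simp [hmemiff.mpr hmod, hmod]
    · have : ¬ ((k : Nat) : Int) ∈ PySem.List.pyRange 3 num 4 := fun h => hmod (hmemiff.mp h)
      simp [this, hmod]
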